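-- pv_equiv track=rewrite | github.com/Testowy2115/Programowanie-gier-komputerowych | LAB 06/utils.py | ghost_positions
-- ===== SOURCE A (Python) =====
-- SCREENW = 800
--
-- SCREENH = 600
--
-- def ghost_positions(x, y, size):
--     positions_x = [x]
--     positions_y = [y]
--
--     if x < size:
--         positions_x.append(x + SCREENW)
--     elif x > SCREENW - size:
--         positions_x.append(x - SCREENW)
--
--     if y < size:
--         positions_y.append(y + SCREENH)
--     elif y > SCREENH - size:
--         positions_y.append(y - SCREENH)
--
--     positions = []
--     for px in positions_x:
--         for py in positions_y:
--             positions.append((px, py))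
--
--     return positions
-- ===== SOURCE B (Python) =====
-- SCREENW = 800
-- SCREENH = 600
--
-- def ghost_positions(x, y, size):
--     # Classify each axis into a wrap case (0 = none, 1 = wrap forward, 2 = wrap back),
--     # turn the case into a signed offset, and return one of four literal result shapes.
--     kx = 1 if x < size else (2 if x > SCREENW - size else 0)
--     ky = 1 if y < size else (2 if y > SCREENH - size else 0)
--     dx = (0, SCREENW, -SCREENW)[kx]
--     dy = (0, SCREENH, -SCREENH)[ky]
--     if kx and ky:
--         return [(x, y), (x, y + dy), (x + dx, y), (x + dx, y + dy)]
--     if kx: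
--         return [(x, y), (x + dx, y)]
--     if ky:
--         return [(x, y), (x, y + dy)]
--     return [(x, y)]
-- ===== Notes on version B (the rewrite author's own statement) =====
-- stated objective: alternative
-- what changed: Replaces the per-axis candidate lists and nested Cartesian-product loop with a per-axis wrap-case classification (0/1/2) mapped to signed offsets and a four-way dispatch returning literal result shapes.
import Mathlib
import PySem

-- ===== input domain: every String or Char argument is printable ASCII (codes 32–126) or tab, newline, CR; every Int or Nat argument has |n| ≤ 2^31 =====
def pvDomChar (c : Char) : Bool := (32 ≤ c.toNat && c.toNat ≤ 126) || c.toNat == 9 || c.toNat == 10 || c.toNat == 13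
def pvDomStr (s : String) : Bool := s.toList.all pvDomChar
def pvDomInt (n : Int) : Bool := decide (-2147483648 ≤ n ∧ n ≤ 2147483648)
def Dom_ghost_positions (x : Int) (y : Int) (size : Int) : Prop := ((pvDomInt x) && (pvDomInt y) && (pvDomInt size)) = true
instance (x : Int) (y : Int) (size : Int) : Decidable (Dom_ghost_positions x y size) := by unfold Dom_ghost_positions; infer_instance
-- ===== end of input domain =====

-- ===== PORT A =====
-- B classifies each axis into a wrap case mapped to a signed offset and dispatches to literal result shapes (objective: alternative).
def SCREENW : Int := 800
def SCREENH : Int := 600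

def ghost_positions (x : Int) (y : Int) (size : Int) : List (Int × Int) :=
  let positions_x := [x]
  let positions_x := if x < size then positions_x ++ [x + SCREENW]
    else if x > SCREENW - size then positions_x ++ [x - SCREENW] else positions_x
  let positions_y := [y]
  let positions_y := if y < size then positions_y ++ [y + SCREENH]
    else if y > SCREENH - size then positions_y ++ [y - SCREENH] else positions_y
  positions_x.foldl (fun acc px => positions_y.foldl (fun acc py => acc ++ [(px, py)]) acc) []

-- ===== PORT B =====
def ghost_positions_alt (x : Int) (y : Int) (size : Int) : List (Int × Int) :=
  let kx : Nat := if x < size then 1 else if x > SCREENW - size then 2 else 0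
  let ky : Nat := if y < size then 1 else if y > SCREENH - size then 2 else 0
  let dx : Int := [0, SCREENW, -SCREENW].getD kx 0
  let dy : Int := [0, SCREENH, -SCREENH].getD ky 0
  if kx ≠ 0 ∧ ky ≠ 0 then [(x, y), (x, y + dy), (x + dx, y), (x + dx, y + dy)]
  else if kx ≠ 0 then [(x, y), (x + dx, y)]
  else if ky ≠ 0 then [(x, y), (x, y + dy)]
  else [(x, y)]

-- ===== PRECONDITION & SPEC =====
def Spec_ghost_positions (x : Int) (y : Int) (size : Int) (out : List (Int × Int)) : Prop := out = ghost_positions_alt x y size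
instance (x : Int) (y : Int) (size : Int) (out : List (Int × Int)) : Decidable (Spec_ghost_positions x y size out) := by unfold Spec_ghost_positions; infer_instance

-- ===== CLAIM (what is proved, stated in full; the proofs are below) =====
def Claim_equal_ghost_positions : Prop := ∀ (x : Int) (y : Int) (size : Int), Dom_ghost_positions x y size → Spec_ghost_positions x y size (ghost_positions x y size)

-- ===== LEMMAS AND PROOFS =====

-- ===== VERDICT (by name: the statement is the Claim_ definition above) =====
theorem ghost_positions_spec : Claim_equal_ghost_positions := by
  intro x y size _
  unfold Spec_ghost_positions ghost_positions ghost_positions_alt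
  split_ifs <;> simp_all [List.foldl] <;> omega
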